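-- pv_equiv track=rewrite | github.com/Duc-PTIT/Python | PY01041 - SỐ TĂNG GIẢM.py | solve
-- ===== SOURCE A (Python) =====
-- def find(s):
--     for i in range(0, len(s) -1):
--         if s[i] == s[i+1]:
--             return -1
--         if s[i] > s[i + 1]:
--             return i
--     return -1
--
-- def solve(s):
--     index = find(s)
--     if index == -1:
--         return "NO"
--     else:
--         for i in range(index, len(s) - 1):
--             if s[i] < s[i+1]:
--                 return "NO"
--         return "YES"
-- ===== SOURCE B (Python) =====
-- def solve(s):
--     if not s:
--         return "NO"
--     p = s.index(max(s))
--     if p == len(s) - 1 or s[p + 1] >= s[p]: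
--         return "NO"
--     up, down = s[:p + 1], s[p:]
--     if all(a < b for a, b in zip(up, up[1:])) and all(a >= b for a, b in zip(down, down[1:])):
--         return "YES"
--     return "NO"
-- ===== Notes on version B (the rewrite author's own statement) =====
-- stated objective: alternative
-- what changed: Replaced A's sequential two-scan design (a find helper locating the first descent, then a re-scan from it) by a peak-first algorithm: B locates the candidate peak directly as the first occurrence of the maximum character via s.index(max(s)) and then verifies bitonicity with whole-slice adjacent-pair checks around it.
import Mathlib
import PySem

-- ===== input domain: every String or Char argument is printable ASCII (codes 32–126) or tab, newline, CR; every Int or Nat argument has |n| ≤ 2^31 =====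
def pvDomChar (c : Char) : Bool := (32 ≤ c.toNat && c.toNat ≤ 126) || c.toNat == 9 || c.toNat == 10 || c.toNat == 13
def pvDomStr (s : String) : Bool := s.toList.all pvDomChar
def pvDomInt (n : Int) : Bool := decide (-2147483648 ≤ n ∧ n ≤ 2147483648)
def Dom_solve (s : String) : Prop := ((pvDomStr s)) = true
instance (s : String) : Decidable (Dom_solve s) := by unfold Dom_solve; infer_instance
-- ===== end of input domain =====

-- B replaces A's sequential scan (find the first descent, then re-scan from it) by a
-- peak-first algorithm: locate the peak as the first occurrence of the maximum character,
-- then verify the two slices around it; objective: alternative.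

-- ===== PORT A =====
-- A's find: scan adjacent pairs carrying the running index i; -1 on an equal pair
-- or at the end, i at the first strictly-descending pair.
def findA : List Char → Int → Int
  | a :: b :: rest, i =>
      if a = b then -1
      else if b < a then i
      else findA (b :: rest) (i + 1)
  | _, _ => -1

-- A's second loop: from the returned index to the end, "NO" on any ascent, else "YES".
def checkA : List Char → String
  | a :: b :: rest => if a < b then "NO" else checkA (b :: rest)
  | _ => "YES"

def solve (s : String) : String :=
  let l := s.toList
  let index := findA l 0
  if index = -1 then "NO" else checkA (l.drop index.toNat)

-- ===== PORT B =====
-- B: p = s.index(max(s)); reject if p is last or s[p+1] >= s[p]; then check the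
-- two slices around p with zip(x, x[1:]) comparisons.  pyGetD is exact here: both
-- indices are in range (p comes from index?, and p ≠ len-1 was just checked).
def solve_alt (s : String) : String :=
  let l := s.toList
  if l = [] then "NO" else
    match PySem.List.max? l (fun y => y) with
    | none => "NO"   -- unreachable: max(s) on nonempty s
    | some m =>
      match PySem.List.index? l m with
      | none => "NO"   -- unreachable: max(s) occurs in s
      | some p =>
        if p = l.length - 1 then "NO"
        else if PySem.List.pyGetD l ((p : Int)) ' ' ≤ PySem.List.pyGetD l ((p : Int) + 1) ' ' then "NO"
        else
          let up := PySem.List.slice l none (some ((p : Int) + 1))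
          let down := PySem.List.slice l (some (p : Int)) none
          if ((List.zip up (PySem.List.slice up (some 1) none)).all (fun ab => decide (ab.1 < ab.2)) &&
              (List.zip down (PySem.List.slice down (some 1) none)).all (fun ab => decide (ab.2 ≤ ab.1)))
          then "YES" else "NO"

-- ===== PRECONDITION & SPEC =====
def Spec_solve (s : String) (out : String) : Prop := out = solve_alt s
instance (s : String) (out : String) : Decidable (Spec_solve s out) := by unfold Spec_solve; infer_instance

-- ===== CLAIM =====
def Claim_equal_solve : Prop := ∀ (s : String), Dom_solve s → Spec_solve s (solve s)

-- ===== LEMMAS AND PROOFS =====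

-- The common characterisation: strictly increasing before p, strict drop at p,
-- never ascending from p on.
def Bip (l : List Char) : Prop := ∃ p : Nat, p + 1 < l.length ∧
  (∀ i : Nat, i < p → l.getD i ' ' < l.getD (i + 1) ' ') ∧
  l.getD (p + 1) ' ' < l.getD p ' ' ∧
  (∀ i : Nat, p ≤ i → i + 1 < l.length → ¬ l.getD i ' ' < l.getD (i + 1) ' ')

lemma getD_drop (l : List Char) (k i : Nat) (d : Char) : (l.drop k).getD i d = l.getD (k + i) d := by
  simp [List.getD_eq_getElem?_getD, List.getElem?_drop]

lemma getD_take (l : List Char) (n i : Nat) (d : Char) (h : i < n) :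
    (l.take n).getD i d = l.getD i d := by
  simp [List.getD_eq_getElem?_getD, h]

-- zip(m, m[1:]) all-check, as a statement about adjacent positions of m.
lemma zip_tail_all_iff (f : Char × Char → Bool) : ∀ (m : List Char),
    ((List.zip m m.tail).all f = true) ↔
      ∀ i : Nat, i + 1 < m.length → f (m.getD i ' ', m.getD (i + 1) ' ') = true := by
  intro m
  induction m with
  | nil => simp
  | cons a t ih =>
    cases t with
    | nil => simp
    | cons b r =>
      simp only [List.tail_cons, List.zip_cons_cons, List.all_cons, Bool.and_eq_true]
      constructor
      · rintro ⟨h1, h2⟩ i hi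
        cases i with
        | zero => simpa using h1
        | succ j =>
          have := ((ih).mp h2) j (by simpa using Nat.lt_of_succ_lt_succ hi)
          simpa using this
      · intro h
        refine ⟨by simpa using h 0 (by simp), (ih).mpr ?_⟩
        intro j hj
        have := h (j + 1) (by simpa using Nat.succ_lt_succ hj)
        simpa using this

lemma checkA_iff : ∀ (m : List Char), checkA m = "YES" ↔
    ∀ i : Nat, i + 1 < m.length → ¬ m.getD i ' ' < m.getD (i + 1) ' ' := by
  intro m
  induction m with
  | nil => simp [checkA]
  | cons a t ih =>
    cases t with
    | nil => simp [checkA]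
    | cons b r =>
      by_cases hab : a < b
      · simp only [checkA, if_pos hab]
        constructor
        · intro h; exact absurd h (by decide)
        · intro h; exact absurd hab (by simpa using h 0 (by simp))
      · simp only [checkA, if_neg hab]
        rw [ih]
        constructor
        · intro h i hi
          cases i with
          | zero => simpa using hab
          | succ j =>
            have := h j (by simpa using Nat.lt_of_succ_lt_succ hi)
            simpa using this
        · intro h j hj
          have := h (j + 1) (by simpa using Nat.succ_lt_succ hj)
          simpa using this

lemma checkA_out : ∀ (m : List Char), checkA m = "YES" ∨ checkA m = "NO" := by
  intro m
  induction m with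
  | nil => exact Or.inl rfl
  | cons a t ih =>
    cases t with
    | nil => exact Or.inl rfl
    | cons b r =>
      by_cases hab : a < b
      · exact Or.inr (by simp [checkA, hab])
      · simpa [checkA, hab] using ih

lemma findA_range : ∀ (l : List Char) (i : Int), 0 ≤ i → findA l i = -1 ∨ i ≤ findA l i := by
  intro l
  induction l with
  | nil => intro i _; exact Or.inl rfl
  | cons a t ih =>
    cases t with
    | nil => intro i _; exact Or.inl rfl
    | cons b r =>
      intro i hi
      by_cases hab : a = b
      · exact Or.inl (by simp [findA, hab])
      · by_cases hba : b < a
        · exact Or.inr (by simp [findA, hab, hba])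
        · have := ih (i + 1) (by omega)
          rw [show findA (a :: b :: r) i = findA (b :: r) (i + 1) by simp [findA, hab, hba]]
          rcases this with h | h
          · exact Or.inl h
          · exact Or.inr (by omega)

-- findA found k: the prefix is strictly increasing and there is a strict drop at k.
lemma findA_found : ∀ (l : List Char) (i : Int), 0 ≤ i → ∀ k : Nat, findA l i = i + k →
    k + 1 < l.length ∧ (∀ j : Nat, j < k → l.getD j ' ' < l.getD (j + 1) ' ') ∧
      l.getD (k + 1) ' ' < l.getD k ' ' := by
  intro l
  induction l with
  | nil => intro i hi k hk; simp [findA] at hk; omega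
  | cons a t ih =>
    cases t with
    | nil => intro i hi k hk; simp [findA] at hk; omega
    | cons b r =>
      intro i hi k hk
      by_cases hab : a = b
      · simp [findA, hab] at hk; omega
      · by_cases hba : b < a
        · simp only [findA, if_neg hab, if_pos hba] at hk
          have hk0 : k = 0 := by omega
          subst hk0
          exact ⟨by simp only [List.length_cons]; omega, by omega, by simpa using hba⟩
        · simp only [findA, if_neg hab, if_neg hba] at hk
          have hk1 : 1 ≤ k := by
            rcases findA_range (b :: r) (i + 1) (by omega) with h | h
            · rw [h] at hk; omega
            · rw [hk] at h; omega
          obtain ⟨h1, h2, h3⟩ := ih (i + 1) (by omega) (k - 1)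
            (by rw [hk]; omega)
          have hab' : a < b := lt_of_le_of_ne (not_lt.mp hba) hab
          refine ⟨by simp only [List.length_cons] at h1 ⊢; omega, ?_, ?_⟩
          · intro j hj
            cases j with
            | zero => simpa using hab'
            | succ j' =>
              have := h2 j' (by omega)
              simpa using this
          · have e1 : k + 1 = (k - 1 + 1) + 1 := by omega
            have e2 : k = (k - 1) + 1 := by omega
            rw [e1, e2, List.getD_cons_succ, List.getD_cons_succ]
            exact h3

-- A strictly increasing prefix with a strict drop at p forces findA to return p.
lemma findA_forced : ∀ (l : List Char) (i : Int) (p : Nat), p + 1 < l.length →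
    (∀ j : Nat, j < p → l.getD j ' ' < l.getD (j + 1) ' ') →
    l.getD (p + 1) ' ' < l.getD p ' ' →
    findA l i = i + p := by
  intro l
  induction l with
  | nil => intro i p hp _ _; simp at hp
  | cons a t ih =>
    cases t with
    | nil => intro i p hp _ _; simp at hp
    | cons b r =>
      intro i p hp hup hdrop
      cases p with
      | zero =>
        have hba : b < a := by simpa using hdrop
        simp [findA, ne_of_gt hba, hba]
      | succ q =>
        have hab : a < b := by simpa using hup 0 (by omega)
        rw [show findA (a :: b :: r) i = findA (b :: r) (i + 1) by
          simp [findA, ne_of_lt hab, asymm hab]]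
        have := ih (i + 1) q (by simp only [List.length_cons] at hp ⊢; omega)
          (fun j hj => by simpa using hup (j + 1) (by omega))
          (by simpa using hdrop)
        rw [this]; push_cast; ring

lemma solve_eq (s : String) : solve s =
    if findA s.toList 0 = -1 then "NO" else checkA (s.toList.drop (findA s.toList 0).toNat) := rfl

lemma solve_yes_iff (s : String) : solve s = "YES" ↔ Bip s.toList := by
  set l := s.toList with hl
  rcases findA_range l 0 le_rfl with h | h
  · rw [solve_eq, ← hl, if_pos h]
    constructor
    · intro hc; exact absurd hc (by decide)
    · rintro ⟨p, hp, hup, hdrop, _⟩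
      have := findA_forced l 0 p hp hup hdrop
      rw [this] at h; omega
  · have hne : findA l 0 ≠ -1 := by omega
    rw [solve_eq, ← hl, if_neg hne]
    set k := (findA l 0).toNat with hk
    have hfk : findA l 0 = (0 : Int) + k := by omega
    obtain ⟨h1, h2, h3⟩ := findA_found l 0 le_rfl k hfk
    rw [checkA_iff]
    constructor
    · intro hdown
      refine ⟨k, h1, h2, h3, ?_⟩
      intro i hpi hi
      have := hdown (i - k) (by rw [List.length_drop]; omega)
      rw [getD_drop, getD_drop] at this
      have e1 : k + (i - k) = i := by omega
      have e2 : k + (i - k + 1) = i + 1 := by omega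
      rwa [e1, e2] at this
    · rintro ⟨p, hp, hup, hdrop, hdown⟩
      have : findA l 0 = (0 : Int) + p := findA_forced l 0 p hp hup hdrop
      have hkp : k = p := by omega
      intro i hi
      rw [getD_drop, getD_drop]
      rw [List.length_drop] at hi
      exact hkp ▸ hdown (k + i) (by omega) (by omega)

lemma solve_out (s : String) : solve s = "YES" ∨ solve s = "NO" := by
  rw [solve_eq]
  split
  · exact Or.inr rfl
  · exact checkA_out _

-- From a Bip witness p, position p carries the strict maximum of l.
lemma bip_strict_max (l : List Char) (p : Nat) (_hp : p + 1 < l.length)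
    (hup : ∀ i : Nat, i < p → l.getD i ' ' < l.getD (i + 1) ' ')
    (hdrop : l.getD (p + 1) ' ' < l.getD p ' ')
    (hdown : ∀ i : Nat, p ≤ i → i + 1 < l.length → ¬ l.getD i ' ' < l.getD (i + 1) ' ') :
    ∀ j : Nat, j < l.length → j ≠ p → l.getD j ' ' < l.getD p ' ' := by
  have up_mono : ∀ dj j : Nat, j + dj ≤ p → l.getD j ' ' ≤ l.getD (j + dj) ' ' := by
    intro dj
    induction dj with
    | zero => intro j _; simp
    | succ d ihd =>
      intro j hj
      have hlt : l.getD j ' ' < l.getD (j + (d + 1)) ' ' := by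
        calc l.getD j ' ' ≤ l.getD (j + d) ' ' := ihd j (by omega)
          _ < l.getD (j + d + 1) ' ' := hup (j + d) (by omega)
          _ = l.getD (j + (d + 1)) ' ' := by rw [Nat.add_assoc]
      exact hlt.le
  have down_mono : ∀ dj j : Nat, p ≤ j → j + dj < l.length → l.getD (j + dj) ' ' ≤ l.getD j ' ' := by
    intro dj
    induction dj with
    | zero => intro j _ _; simp
    | succ d ihd =>
      intro j hj hlen
      have step : ¬ l.getD (j + d) ' ' < l.getD (j + d + 1) ' ' :=
        hdown (j + d) (by omega) (by omega)
      calc l.getD (j + (d + 1)) ' ' = l.getD (j + d + 1) ' ' := by ring_nf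
        _ ≤ l.getD (j + d) ' ' := not_lt.mp step
        _ ≤ l.getD j ' ' := ihd j hj (by omega)
  intro j hj hjp
  rcases Nat.lt_or_ge j p with hlt | hge
  · calc l.getD j ' ' ≤ l.getD (j + (p - 1 - j)) ' ' := up_mono (p - 1 - j) j (by omega)
      _ < l.getD (j + (p - 1 - j) + 1) ' ' := hup (j + (p - 1 - j)) (by omega)
      _ = l.getD p ' ' := by congr 1; omega
  · have hj1 : p + 1 ≤ j := by omega
    calc l.getD j ' ' = l.getD ((p + 1) + (j - (p + 1))) ' ' := by congr 1; omega
      _ ≤ l.getD (p + 1) ' ' := down_mono (j - (p + 1)) (p + 1) (by omega) (by omega)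
      _ < l.getD p ' ' := hdrop

lemma solve_alt_eq (s : String) : solve_alt s =
    (if s.toList = [] then "NO" else
      match PySem.List.max? s.toList (fun y => y) with
      | none => "NO"
      | some m =>
        match PySem.List.index? s.toList m with
        | none => "NO"
        | some p =>
          if p = s.toList.length - 1 then "NO"
          else if PySem.List.pyGetD s.toList ((p : Int)) ' ' ≤ PySem.List.pyGetD s.toList ((p : Int) + 1) ' ' then "NO"
          else
            if ((List.zip (PySem.List.slice s.toList none (some ((p : Int) + 1)))
                  (PySem.List.slice (PySem.List.slice s.toList none (some ((p : Int) + 1))) (some 1) none)).all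
                    (fun ab => decide (ab.1 < ab.2)) &&
                (List.zip (PySem.List.slice s.toList (some (p : Int)) none)
                  (PySem.List.slice (PySem.List.slice s.toList (some (p : Int)) none) (some 1) none)).all
                    (fun ab => decide (ab.2 ≤ ab.1)))
            then "YES" else "NO") := rfl

lemma solve_alt_yes_iff (s : String) : solve_alt s = "YES" ↔ Bip s.toList := by
  set l := s.toList with hl
  by_cases hnil : l = []
  · rw [solve_alt_eq, ← hl, if_pos hnil]
    constructor
    · intro hc; exact absurd hc (by decide)
    · rintro ⟨p, hp, _⟩; simp [hnil] at hp
  · constructor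
    · intro hyes
      rw [solve_alt_eq, ← hl, if_neg hnil] at hyes
      rcases hm : PySem.List.max? l (fun y => y) with _ | m
      · rw [hm] at hyes; simp only [] at hyes; exact absurd hyes (by decide)
      rcases hpi : PySem.List.index? l m with _ | p
      · rw [hm] at hyes; simp only [] at hyes; rw [hpi] at hyes
        simp only [] at hyes; exact absurd hyes (by decide)
      rw [hm] at hyes; simp only [] at hyes; rw [hpi] at hyes; simp only [] at hyes
      obtain ⟨hplen, hlp, _⟩ := PySem.List.getElem_of_index?_eq_some hpi
      by_cases hlast : p = l.length - 1
      · rw [if_pos hlast] at hyes; exact absurd hyes (by decide)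
      rw [if_neg hlast] at hyes
      have hp1 : p + 1 < l.length := by omega
      by_cases hle : PySem.List.pyGetD l ((p : Int)) ' ' ≤ PySem.List.pyGetD l ((p : Int) + 1) ' '
      · rw [if_pos hle] at hyes; exact absurd hyes (by decide)
      rw [if_neg hle] at hyes
      have hdrop : l.getD (p + 1) ' ' < l.getD p ' ' := by
        rw [not_le] at hle
        have e : ((p : Int) + 1) = ((p + 1 : Nat) : Int) := by push_cast; ring
        rw [e, PySem.List.pyGetD_natCast, PySem.List.pyGetD_natCast] at hle
        exact hle
      split_ifs at hyes with hall
      · -- extract the two all-checks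
        rw [Bool.and_eq_true] at hall
        obtain ⟨hupB, hdownB⟩ := hall
        have eup : PySem.List.slice l none (some ((p : Int) + 1)) = l.take (p + 1) := by
          have e : ((p : Int) + 1) = ((p + 1 : Nat) : Int) := by push_cast; ring
          rw [e, PySem.List.slice_to_natCast]
        have edown : PySem.List.slice l (some (p : Int)) none = l.drop p := by
          rw [PySem.List.slice_from_natCast]
        rw [eup, PySem.List.slice_from_one, zip_tail_all_iff] at hupB
        rw [edown, PySem.List.slice_from_one, zip_tail_all_iff] at hdownB
        refine ⟨p, hp1, ?_, hdrop, ?_⟩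
        · intro i hi
          have := hupB i (by rw [List.length_take]; omega)
          rw [getD_take _ _ _ _ (by omega), getD_take _ _ _ _ (by omega)] at this
          simpa using this
        · intro i hpi hi
          have := hdownB (i - p) (by rw [List.length_drop]; omega)
          rw [getD_drop, getD_drop] at this
          have e1 : p + (i - p) = i := by omega
          have e2 : p + (i - p + 1) = i + 1 := by omega
          rw [e1, e2] at this
          simp only [decide_eq_true_eq] at this
          exact not_lt.mpr this
      · exact absurd hyes (by decide)
    · rintro ⟨p, hp1, hup, hdrop, hdown⟩
      have hplen : p < l.length := by omega
      have hmax := bip_strict_max l p hp1 hup hdrop hdown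
      -- max? returns some m
      rcases hm : PySem.List.max? l (fun y => y) with _ | m
      · exact absurd ((PySem.List.max?_eq_none_iff l (fun y => y)).mp hm) hnil
      have hmmem : m ∈ l := PySem.List.max?_mem hm
      have hmub : ∀ y ∈ l, y ≤ m := by
        intro y hy; exact PySem.List.max?_isMax hm y hy
      -- m is l[p]
      have hm_eq : m = l.getD p ' ' := by
        obtain ⟨j, hjlen, hjm⟩ := List.mem_iff_getElem.mp hmmem
        by_cases hjp : j = p
        · subst hjp; rw [← hjm, List.getD_eq_getElem l ' ' hplen]
        · have h1 : m < l.getD p ' ' := by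
            rw [← hjm, ← List.getD_eq_getElem l ' ' hjlen]
            exact hmax j hjlen hjp
          have h2 : l.getD p ' ' ≤ m := by
            refine hmub _ ?_
            rw [List.getD_eq_getElem l ' ' hplen]
            exact List.getElem_mem hplen
          exact absurd h1 (not_lt.mpr h2)
      -- index? l m = some p
      have hpi : PySem.List.index? l m = some p := by
        rw [PySem.List.index?_eq_some_iff]
        refine ⟨l.take p, l.drop (p + 1), ?_, by simp [List.length_take]; omega, ?_⟩
        · rw [hm_eq, List.getD_eq_getElem l ' ' hplen]
          conv_lhs => rw [← List.take_append_drop p l]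
          congr 1
          exact (List.getElem_cons_drop hplen).symm
        · intro hmem
          obtain ⟨j, hjlen, hjm⟩ := List.mem_iff_getElem.mp hmem
          rw [List.length_take] at hjlen
          have hjp : j < p := by omega
          have : (l.take p)[j] = l.getD j ' ' := by
            rw [List.getElem_take, List.getD_eq_getElem l ' ' (by omega)]
          rw [this] at hjm
          have := hmax j (by omega) (by omega)
          rw [hjm, hm_eq] at this
          exact absurd this (lt_irrefl _)
      rw [solve_alt_eq, ← hl, if_neg hnil, hm]
      simp only []
      rw [hpi]
      simp only []
      rw [if_neg (by omega)]
      have hlegetD : ¬ PySem.List.pyGetD l ((p : Int)) ' ' ≤ PySem.List.pyGetD l ((p : Int) + 1) ' ' := by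
        have e : ((p : Int) + 1) = ((p + 1 : Nat) : Int) := by push_cast; ring
        rw [e]
        simp only [PySem.List.pyGetD_natCast]
        exact not_le.mpr hdrop
      rw [if_neg hlegetD]
      have eup : PySem.List.slice l none (some ((p : Int) + 1)) = l.take (p + 1) := by
        have e : ((p : Int) + 1) = ((p + 1 : Nat) : Int) := by push_cast; ring
        rw [e, PySem.List.slice_to_natCast]
      have edown : PySem.List.slice l (some (p : Int)) none = l.drop p := by
        rw [PySem.List.slice_from_natCast]
      rw [if_pos ?_]
      rw [eup, edown, PySem.List.slice_from_one, PySem.List.slice_from_one, Bool.and_eq_true,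
        zip_tail_all_iff, zip_tail_all_iff]
      constructor
      · intro i hi
        rw [List.length_take] at hi
        rw [getD_take _ _ _ _ (by omega), getD_take _ _ _ _ (by omega)]
        simpa using hup i (by omega)
      · intro i hi
        rw [List.length_drop] at hi
        rw [getD_drop, getD_drop]
        have := hdown (p + i) (by omega) (by omega)
        have e : p + i + 1 = p + (i + 1) := by omega
        rw [e] at this
        simpa using not_lt.mp this

lemma solve_alt_out (s : String) : solve_alt s = "YES" ∨ solve_alt s = "NO" := by
  rw [solve_alt_eq]
  split
  · exact Or.inr rfl
  · split
    · exact Or.inr rfl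
    · split
      · exact Or.inr rfl
      · split
        · exact Or.inr rfl
        · split
          · exact Or.inr rfl
          · split
            · exact Or.inl rfl
            · exact Or.inr rfl

-- ===== VERDICT =====
theorem solve_spec : Claim_equal_solve := by
  intro s _
  show solve s = solve_alt s
  by_cases h : Bip s.toList
  · rw [(solve_yes_iff s).mpr h, ((solve_alt_yes_iff s).mpr h).symm]
  · rcases solve_out s with hA | hA
    · exact absurd ((solve_yes_iff s).mp hA) h
    · rcases solve_alt_out s with hB | hB
      · exact absurd ((solve_alt_yes_iff s).mp hB) h
      · rw [hA, hB]
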